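-- pv_equiv track=rewrite | github.com/HKUST-KnowComp/GoldCoin | eval/parse_eval_result.py | first_compliance_result
-- ===== SOURCE A (Python) =====
-- def first_compliance_result(response):
--     result = ""
--     labels = ["permit", "permis", "complies with", "not violat", "allow", "not explicitly prohibit", "not forbid",
--               "forbid", "not permit", "prohibit", "not comply", "not fully comply", "violat"]
--     first_label_index = len(response)
--     first_label = ""
--     for label in labels:
--         if label in response:
--             label_index = response.index(label)
--             if label_index < first_label_index:
--                 first_label_index = label_index
--                 first_label = label
--
--     if first_label in ["permit", "permis", "complies with", "not violat", "allow", "not explicitly prohibit", "not forbid"]: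
--         result = "permit"
--     elif first_label in ["forbid", "not permit", "prohibit", "not comply", "not fully comply", "violat"]:
--         result = "forbid"
--     return result
-- ===== SOURCE B (Python) =====
-- def first_compliance_result(response):
--     pairs = [("permit", "permit"), ("permis", "permit"), ("complies with", "permit"),
--              ("not violat", "permit"), ("allow", "permit"),
--              ("not explicitly prohibit", "permit"), ("not forbid", "permit"),
--              ("forbid", "forbid"), ("not permit", "forbid"), ("prohibit", "forbid"),
--              ("not comply", "forbid"), ("not fully comply", "forbid"), ("violat", "forbid")]
--     for i in range(len(response)):
--         for label, group in pairs:
--             if response.startswith(label, i):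
--                 return group
--     return ""
-- ===== Notes on version B (the rewrite author's own statement) =====
-- stated objective: alternative
-- what changed: A computes the first-occurrence index of each of the 13 labels with a substring search per label and takes the argmin with list-order tie-break; B makes a single left-to-right scan over positions, testing at each position whether any label (in list order) starts there and returning that label's group immediately on the first hit.
import Mathlib
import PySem

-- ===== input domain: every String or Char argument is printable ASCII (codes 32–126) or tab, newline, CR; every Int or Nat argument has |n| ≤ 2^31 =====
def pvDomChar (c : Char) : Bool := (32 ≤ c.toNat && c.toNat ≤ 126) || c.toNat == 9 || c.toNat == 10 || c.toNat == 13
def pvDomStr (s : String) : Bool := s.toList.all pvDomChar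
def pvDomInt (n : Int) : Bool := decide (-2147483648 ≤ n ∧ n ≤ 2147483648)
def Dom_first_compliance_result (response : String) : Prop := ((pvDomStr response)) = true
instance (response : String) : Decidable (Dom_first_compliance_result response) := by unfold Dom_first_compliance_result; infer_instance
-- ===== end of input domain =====

-- B replaces A's "compute the first index of each of the 13 labels, take the argmin" pass by a
-- single left-to-right scan that returns the group of the first label matching at the earliest
-- position (objective: alternative decomposition with early termination; same exact result).

-- ===== PORT A =====
def fcLabels : List String :=
  ["permit", "permis", "complies with", "not violat", "allow", "not explicitly prohibit", "not forbid",
   "forbid", "not permit", "prohibit", "not comply", "not fully comply", "violat"]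

-- loop body of A's 'for label in labels' loop
def fcStep (response : String) (st : Int × String) (label : String) : Int × String :=
  if PySem.Str.isIn label response then
    let label_index := PySem.Str.find response label
    if label_index < st.1 then (label_index, label) else st
  else st

def first_compliance_result (response : String) : String :=
  let st := fcLabels.foldl (fcStep response) ((PySem.Str.len response : Int), "")
  let first_label := st.2
  if first_label ∈ (["permit", "permis", "complies with", "not violat", "allow", "not explicitly prohibit", "not forbid"] : List String) then
    "permit"
  else if first_label ∈ (["forbid", "not permit", "prohibit", "not comply", "not fully comply", "violat"] : List String) then
    "forbid"
  else ""

-- ===== PORT B =====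
def fcPairs : List (String × String) :=
  [("permit", "permit"), ("permis", "permit"), ("complies with", "permit"),
   ("not violat", "permit"), ("allow", "permit"),
   ("not explicitly prohibit", "permit"), ("not forbid", "permit"),
   ("forbid", "forbid"), ("not permit", "forbid"), ("prohibit", "forbid"),
   ("not comply", "forbid"), ("not fully comply", "forbid"), ("violat", "forbid")]

-- B's scan: 'for i in range(len(response))' as recursion on the suffix starting at i;
-- 'response.startswith(label, i)' is PySem.Chars.startswith on that suffix.
def fcScan : List Char → String
  | [] => ""
  | c :: t =>
    match fcPairs.find? (fun p => PySem.Chars.startswith (c :: t) p.1.toList) with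
    | some p => p.2
    | none => fcScan t

def first_compliance_result_alt (response : String) : String :=
  fcScan response.toList

-- ===== PRECONDITION & SPEC =====
def Spec_first_compliance_result (response : String) (out : String) : Prop := out = first_compliance_result_alt response
instance (response : String) (out : String) : Decidable (Spec_first_compliance_result response out) := by unfold Spec_first_compliance_result; infer_instance

-- ===== CLAIM (what is proved, stated in full; the proofs are below) =====
def Claim_equal_first_compliance_result : Prop := ∀ (response : String), Dom_first_compliance_result response → Spec_first_compliance_result response (first_compliance_result response)

-- ===== LEMMAS AND PROOFS =====

-- A's loop body, expressed on the character list (what fcStep becomes under the Str→Chars bridges)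
def fcStepC (s : List Char) (st : Int × String) (label : String) : Int × String :=
  if PySem.Chars.isIn label.toList s then
    if PySem.Chars.find s label.toList < st.1 then (PySem.Chars.find s label.toList, label) else st
  else st

lemma fcStep_eq_fcStepC (r : String) (st : Int × String) (label : String) :
    fcStep r st label = fcStepC r.toList st label := by
  simp [fcStep, fcStepC]

-- A's classification tail, on the first_label found
def fcClassify (first_label : String) : String :=
  if first_label ∈ (["permit", "permis", "complies with", "not violat", "allow", "not explicitly prohibit", "not forbid"] : List String) then
    "permit"
  else if first_label ∈ (["forbid", "not permit", "prohibit", "not comply", "not fully comply", "violat"] : List String) then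
    "forbid"
  else ""

lemma fcLabels_eq_map_fst : fcLabels = fcPairs.map Prod.fst := by decide

-- find = 0 exactly at a prefix occurrence
lemma find_eq_zero_of_prefix {s sub : List Char} (h : sub <+: s) :
    PySem.Chars.find s sub = 0 := by
  have h0 : 0 ≤ PySem.Chars.find s sub := (PySem.Chars.find_nonneg_iff s sub).2 h.isInfix
  rcases PySem.Chars.find_spec h0 with ⟨-, hmin⟩
  by_contra hne
  have hpos : 0 < (PySem.Chars.find s sub).toNat := by omega
  exact hmin 0 hpos (by simpa using h)

lemma find_pos_of_not_prefix {s sub : List Char} (hin : PySem.Chars.isIn sub s = true)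
    (hnp : ¬ sub <+: s) : 0 < PySem.Chars.find s sub := by
  have h0 : 0 ≤ PySem.Chars.find s sub := (PySem.Chars.find_nonneg_iff s sub).2 ((PySem.Chars.isIn_iff_infix sub s).1 hin)
  rcases lt_or_eq_of_le h0 with h | h
  · exact h
  · exfalso
    rcases PySem.Chars.find_spec h0 with ⟨hpre, -⟩
    rw [← h] at hpre
    simpa using hnp hpre

-- stepping find across a cons when the label is not a prefix
lemma find_cons_of_not_prefix {c : Char} {t sub : List Char} (hnp : ¬ sub <+: (c :: t)) :
    PySem.Chars.find (c :: t) sub =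
      (if PySem.Chars.isIn sub t then PySem.Chars.find t sub + 1 else -1) := by
  by_cases hin : PySem.Chars.isIn sub t = true
  · rw [if_pos hin]
    have hinf : sub <:+: t := (PySem.Chars.isIn_iff_infix sub t).1 hin
    have hk0 : 0 ≤ PySem.Chars.find t sub := (PySem.Chars.find_nonneg_iff t sub).2 hinf
    have hf0 : 0 ≤ PySem.Chars.find (c :: t) sub :=
      (PySem.Chars.find_nonneg_iff _ sub).2 (List.infix_cons_iff.2 (Or.inr hinf))
    rcases PySem.Chars.find_spec hk0 with ⟨hkpre, hkmin⟩
    rcases PySem.Chars.find_spec hf0 with ⟨hfpre, hfmin⟩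
    set f := PySem.Chars.find (c :: t) sub with hf
    set k := PySem.Chars.find t sub with hk
    -- f ≤ k + 1 : sub is a prefix of (c::t).drop (k.toNat+1) = t.drop k.toNat
    have hle : f ≤ k + 1 := by
      by_contra hgt
      have : (k.toNat + 1) < f.toNat := by omega
      exact hfmin (k.toNat + 1) this (by simpa using hkpre)
    -- k + 1 ≤ f : f ≠ 0 (not a prefix), and f ≥ 1 means prefix at t.drop (f.toNat - 1)
    have hfz : f ≠ 0 := by
      intro h0
      rw [h0] at hfpre
      simpa using hnp hfpre
    have hge : k + 1 ≤ f := by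
      by_contra hlt
      have hf1 : 1 ≤ f := by omega
      have hdrop : List.drop f.toNat (c :: t) = List.drop (f.toNat - 1) t := by
        have : f.toNat = (f.toNat - 1) + 1 := by omega
        rw [this]; rfl
      rw [hdrop] at hfpre
      exact hkmin (f.toNat - 1) (by omega) hfpre
    omega
  · rw [if_neg hin]
    have : ¬ sub <:+: (c :: t) := by
      intro h
      rcases List.infix_cons_iff.1 h with h | h
      · exact hnp h
      · exact hin ((PySem.Chars.isIn_iff_infix sub t).2 h)
    exact (PySem.Chars.find_eq_neg_one_iff _ sub).2 this

-- A's fold, once the minimum 0 is in the state, never changes it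
lemma foldl_stepC_zero (s : List Char) (L : List String) (lbl : String) :
    L.foldl (fcStepC s) (0, lbl) = (0, lbl) := by
  induction L with
  | nil => rfl
  | cons l L ih =>
    have : fcStepC s (0, lbl) l = (0, lbl) := by
      unfold fcStepC
      by_cases hin : PySem.Chars.isIn l.toList s = true
      · have h0 : 0 ≤ PySem.Chars.find s l.toList :=
          (PySem.Chars.find_nonneg_iff s l.toList).2 ((PySem.Chars.isIn_iff_infix _ s).1 hin)
        simp [hin, not_lt.2 h0]
      · simp [hin]
    simpa [List.foldl_cons, this] using ih

-- A's fold keeps a positive index positive while no label is a prefix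
lemma foldl_stepC_pos (s : List Char) (L : List String)
    (h : ∀ l ∈ L, ¬ l.toList <+: s) :
    ∀ n lbl, 0 < n → 0 < (L.foldl (fcStepC s) (n, lbl)).1 := by
  induction L with
  | nil => intro n lbl hn; simpa using hn
  | cons l L ih =>
    intro n lbl hn
    have hl := h l (List.mem_cons_self ..)
    have hrest : ∀ l' ∈ L, ¬ l'.toList <+: s := fun l' hl' => h l' (List.mem_cons_of_mem _ hl')
    rw [List.foldl_cons]
    unfold fcStepC
    by_cases hin : PySem.Chars.isIn l.toList s = true
    · have hpos := find_pos_of_not_prefix hin hl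
      by_cases hlt : PySem.Chars.find s l.toList < n
      · simpa [hin, hlt] using ih hrest _ l hpos
      · simpa [hin, hlt] using ih hrest _ lbl hn
    · simpa [hin] using ih hrest _ lbl hn

-- the shift lemma: when no label is a prefix of c :: t, A's fold on c :: t is A's fold on t
-- with every index shifted by one (same chosen label)
lemma foldl_stepC_shift (c : Char) (t : List Char) (L : List String)
    (h : ∀ l ∈ L, ¬ l.toList <+: (c :: t)) :
    ∀ n lbl, L.foldl (fcStepC (c :: t)) (n + 1, lbl) =
      ((L.foldl (fcStepC t) (n, lbl)).1 + 1, (L.foldl (fcStepC t) (n, lbl)).2) := by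
  induction L with
  | nil => intro n lbl; rfl
  | cons l L ih =>
    intro n lbl
    have hl := h l (List.mem_cons_self ..)
    have hrest : ∀ l' ∈ L, ¬ l'.toList <+: (c :: t) := fun l' hl' => h l' (List.mem_cons_of_mem _ hl')
    rw [List.foldl_cons, List.foldl_cons]
    have hfind := find_cons_of_not_prefix (sub := l.toList) hl
    by_cases hin : PySem.Chars.isIn l.toList t = true
    · have hinc : PySem.Chars.isIn l.toList (c :: t) = true := by
        rw [PySem.Chars.isIn_iff_infix]
        exact List.infix_cons_iff.2 (Or.inr ((PySem.Chars.isIn_iff_infix _ t).1 hin))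
      have hfind' : PySem.Chars.find (c :: t) l.toList = PySem.Chars.find t l.toList + 1 := by
        rw [hfind, if_pos hin]
      by_cases hlt : PySem.Chars.find t l.toList < n
      · have hlt' : PySem.Chars.find t l.toList + 1 < n + 1 := by omega
        have e1 : fcStepC (c :: t) (n + 1, lbl) l = (PySem.Chars.find t l.toList + 1, l) := by
          simp only [fcStepC, hinc, hfind', if_true]
          rw [if_pos hlt']
        have e2 : fcStepC t (n, lbl) l = (PySem.Chars.find t l.toList, l) := by
          simp only [fcStepC, hin, if_true]
          rw [if_pos hlt]
        rw [e1, e2]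
        exact ih hrest _ l
      · have hlt' : ¬ PySem.Chars.find t l.toList + 1 < n + 1 := by omega
        have e1 : fcStepC (c :: t) (n + 1, lbl) l = (n + 1, lbl) := by
          simp only [fcStepC, hinc, hfind', if_true]
          rw [if_neg hlt']
        have e2 : fcStepC t (n, lbl) l = (n, lbl) := by
          simp only [fcStepC, hin, if_true]
          rw [if_neg hlt]
        rw [e1, e2]
        exact ih hrest _ lbl
    · by_cases hinc : PySem.Chars.isIn l.toList (c :: t) = true
      · -- present in c :: t but not in t and not a prefix: impossible
        exfalso
        rcases List.infix_cons_iff.1 ((PySem.Chars.isIn_iff_infix _ _).1 hinc) with hpre | hinf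
        · exact hl hpre
        · exact hin ((PySem.Chars.isIn_iff_infix _ t).2 hinf)
      · simp only [fcStepC, Bool.not_eq_true] at hin hinc ⊢
        simp only [hin, hinc]
        exact ih hrest _ lbl

-- when the list-order-first prefix label is p, A's fold lands exactly on (0, p)
lemma foldl_stepC_first_prefix (s : List Char) (L1 L2 : List String) (l : String)
    (h1 : ∀ l' ∈ L1, ¬ l'.toList <+: s) (hl : l.toList <+: s) {n : Int} (hn : 0 < n) :
    (L1 ++ l :: L2).foldl (fcStepC s) (n, "") = (0, l) := by
  rw [List.foldl_append]
  obtain ⟨st1, hst1⟩ : ∃ st, L1.foldl (fcStepC s) (n, "") = st := ⟨_, rfl⟩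
  have hpos : 0 < st1.1 := by
    rw [← hst1]; exact foldl_stepC_pos s L1 h1 n "" hn
  rw [hst1, List.foldl_cons]
  have hstep : fcStepC s st1 l = (0, l) := by
    have hin : PySem.Chars.isIn l.toList s = true := (PySem.Chars.isIn_iff_infix _ s).2 hl.isInfix
    have hfz := find_eq_zero_of_prefix hl
    unfold fcStepC
    simp [hin, hfz, hpos]
  rw [hstep]
  exact foldl_stepC_zero s L2 l

-- the group stored in fcPairs is exactly what A's membership chain computes for that label
lemma fcClassify_pairs : ∀ p ∈ fcPairs, fcClassify p.1 = p.2 := by decide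

-- main list-level lemma: A's whole computation equals B's scan
lemma main_lemma (s : List Char) :
    fcClassify (fcLabels.foldl (fcStepC s) ((s.length : Int), "")).2 = fcScan s := by
  induction s with
  | nil => decide
  | cons c t ih =>
    rcases hf : fcPairs.find? (fun p => PySem.Chars.startswith (c :: t) p.1.toList) with _ | p
    · -- no label matches at position 0: shift and reuse ih
      have hnp : ∀ l ∈ fcLabels, ¬ l.toList <+: (c :: t) := by
        intro l hl hpre
        rw [fcLabels_eq_map_fst] at hl
        rcases List.mem_map.1 hl with ⟨p, hp, rfl⟩
        have := List.find?_eq_none.1 hf p hp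
        rw [← PySem.Chars.startswith_iff (c :: t) p.1.toList] at hpre
        exact this hpre
      have hlen : ((c :: t).length : Int) = (t.length : Int) + 1 := by
        exact_mod_cast rfl
      rw [hlen, foldl_stepC_shift c t fcLabels hnp (t.length : Int) ""]
      simpa [fcScan, hf] using ih
    · -- p is the first pair whose label matches at position 0
      rcases List.find?_eq_some_iff_append.1 hf with ⟨hp, as, bs, hsplit, hprev⟩
      have hpre : p.1.toList <+: (c :: t) := (PySem.Chars.startswith_iff _ _).1 hp
      have hprev' : ∀ l' ∈ as.map Prod.fst, ¬ l'.toList <+: (c :: t) := by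
        intro l' hl' hpre'
        rcases List.mem_map.1 hl' with ⟨q, hq, rfl⟩
        have := hprev q hq
        rw [← PySem.Chars.startswith_iff (c :: t) q.1.toList] at hpre'
        simp [hpre'] at this
      have hn : (0 : Int) < ((c :: t).length : Int) := by exact_mod_cast Nat.succ_pos t.length
      have hmem : p ∈ fcPairs := by rw [hsplit]; exact List.mem_append_right _ (List.mem_cons_self ..)
      rw [fcLabels_eq_map_fst, hsplit, List.map_append, List.map_cons,
        foldl_stepC_first_prefix (c :: t) (as.map Prod.fst) (bs.map Prod.fst) p.1 hprev' hpre hn]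
      simpa [fcScan, hf] using fcClassify_pairs p hmem

-- ===== VERDICT (by name: the statement is the Claim_ definition above) =====
theorem first_compliance_result_spec : Claim_equal_first_compliance_result := by
  intro response _
  unfold Spec_first_compliance_result first_compliance_result first_compliance_result_alt
  have hstep : fcStep response = fcStepC response.toList := by
    funext st label; exact fcStep_eq_fcStepC response st label
  have hlen : PySem.Str.len response = (response.toList.length : Int) := by
    simp [PySem.Str.len_eq]
  rw [hstep, hlen]
  exact main_lemma response.toList
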